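-- pv_equiv track=rewrite | github.com/BehrazFS/data-structure | DS_Projects/project5/Classes.py | wordToHex
-- ===== SOURCE A (Python) =====
-- def wordToHex(lValue):
--     wordToHexValue = ''
--     wordToHexValue_temp = ''
--     for lCount in range(4):
--         lByte = (lValue >> (lCount * 8)) & 255
--         wordToHexValue_temp = "0" + format(lByte, 'x')
--         wordToHexValue = wordToHexValue + wordToHexValue_temp[-2:]
--     return wordToHexValue
-- ===== SOURCE B (Python) =====
-- def wordToHex(lValue):
--     n = lValue & 0xFFFFFFFF
--     return n.to_bytes(4, 'little').hex()
-- ===== Notes on version B (the rewrite author's own statement) =====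
-- stated objective: idiomatic
-- what changed: A's four-iteration shift/mask/format/slice string-building loop is replaced by masking the word once with 0xFFFFFFFF and converting them in bulk via int.to_bytes(4,'little').hex().
import Mathlib
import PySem

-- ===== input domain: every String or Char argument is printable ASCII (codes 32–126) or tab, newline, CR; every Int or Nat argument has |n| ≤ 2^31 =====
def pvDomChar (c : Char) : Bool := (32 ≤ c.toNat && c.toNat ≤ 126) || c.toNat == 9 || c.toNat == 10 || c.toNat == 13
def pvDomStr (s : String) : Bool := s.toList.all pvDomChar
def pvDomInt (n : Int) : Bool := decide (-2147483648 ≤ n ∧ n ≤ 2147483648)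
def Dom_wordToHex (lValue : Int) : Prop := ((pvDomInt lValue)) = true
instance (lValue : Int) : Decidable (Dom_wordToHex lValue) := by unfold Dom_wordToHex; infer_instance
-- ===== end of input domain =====

set_option maxRecDepth 10000


-- B replaces A's per-byte shift/format/slice string loop with a single mask and a bulk
-- little-endian byte-buffer hex conversion (objective: idiomatic).

-- ===== PORT A =====
-- a hex digit character (0-9, a-f), used to port Python's hex formatting
def hexDigitChar (d : Nat) : Char := if d < 10 then Char.ofNat (48 + d) else Char.ofNat (87 + d)

def wordToHex (lValue : Int) : String :=
  (PySem.List.pyRange 0 4 1).foldl (fun wordToHexValue lCount =>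
    -- lByte = (lValue >> (lCount * 8)) & 255
    let lByte := PySem.Int.band (lValue >>> (lCount * 8).toNat) 255
    -- wordToHexValue_temp = "0" + format(lByte, 'x'); format(n,'x') ported as
    -- Nat.toDigits 16 (lowercase hex digits; exact for the nonnegative lByte)
    let temp : List Char := '0' :: Nat.toDigits 16 lByte.toNat
    -- wordToHexValue = wordToHexValue + wordToHexValue_temp[-2:]
    wordToHexValue ++ String.ofList (PySem.List.slice temp (some (-2)) none)) ""

-- ===== PORT B =====
-- the two lowercase hex digits of one buffer byte (what bytes.hex() emits per byte)
def byteHex (b : Int) : List Char :=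
  [hexDigitChar (PySem.Int.floordiv b 16).toNat, hexDigitChar (PySem.Int.mod b 16).toNat]

def wordToHex_alt (lValue : Int) : String :=
  let n := PySem.Int.band lValue 0xFFFFFFFF
  -- n.to_bytes(4, 'little'): the 4 little-endian bytes of n
  let bytesLE : List Int :=
    [PySem.Int.mod n 256,
     PySem.Int.mod (PySem.Int.floordiv n 256) 256,
     PySem.Int.mod (PySem.Int.floordiv n 65536) 256,
     PySem.Int.mod (PySem.Int.floordiv n 16777216) 256]
  -- .hex(): two lowercase digits per buffer byte, one pass over the buffer
  String.ofList (bytesLE.flatMap byteHex)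

-- ===== PRECONDITION & SPEC =====
def Spec_wordToHex (lValue : Int) (out : String) : Prop := out = wordToHex_alt lValue
instance (lValue : Int) (out : String) : Decidable (Spec_wordToHex lValue out) := by unfold Spec_wordToHex; infer_instance

-- ===== CLAIM (what is proved, stated in full; the proofs are below) =====
def Claim_equal_wordToHex : Prop := ∀ (lValue : Int), Dom_wordToHex lValue → Spec_wordToHex lValue (wordToHex lValue)

-- ===== LEMMAS AND PROOFS =====

theorem band_255 (a : Int) : PySem.Int.band a 255 = a % 256 := by
  unfold PySem.Int.band
  split
  · norm_num
    rw [show ((255:Int).toNat) = 255 from rfl, Nat.and_two_pow_sub_one_eq_mod a.toNat 8]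
    omega
  · norm_num
    have h := Nat.and_two_pow_sub_one_eq_mod ((-a).toNat - 1) 8
    norm_num at h
    rw [show ((255:Int).toNat) = 255 from rfl, Nat.and_comm, h]
    omega

theorem band_mask32 (a : Int) : PySem.Int.band a 0xFFFFFFFF = a % 4294967296 := by
  unfold PySem.Int.band
  split
  · norm_num
    rw [show ((4294967295:Int).toNat) = 4294967295 from rfl,
      Nat.and_two_pow_sub_one_eq_mod a.toNat 32]
    omega
  · norm_num
    have h := Nat.and_two_pow_sub_one_eq_mod ((-a).toNat - 1) 32
    norm_num at h
    rw [show ((4294967295:Int).toNat) = 4294967295 from rfl, Nat.and_comm, h]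
    omega

theorem slice_hex_fin : ∀ v : Fin 256,
    PySem.List.slice ('0' :: Nat.toDigits 16 v.val) (some (-2)) none
      = [hexDigitChar (v.val / 16), hexDigitChar (v.val % 16)] := by decide

-- the sliced "0"+hex of a byte value is exactly its two hex digits
theorem hex2 (v : Int) (h0 : 0 ≤ v) (h1 : v < 256) :
    String.ofList (PySem.List.slice ('0' :: Nat.toDigits 16 v.toNat) (some (-2)) none)
      = String.ofList (byteHex v) := by
  have hfin := slice_hex_fin ⟨v.toNat, by omega⟩
  simp only [byteHex, PySem.Int.floordiv_eq_ediv_of_pos (by norm_num : (0:Int) < 16),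
    PySem.Int.mod_eq_emod_of_pos (by norm_num : (0:Int) < 16)]
  rw [show (v / 16).toNat = v.toNat / 16 by omega, show (v % 16).toNat = v.toNat % 16 by omega]
  exact congrArg String.ofList hfin

-- ===== VERDICT (by name: the statement is the Claim_ definition above) =====
theorem wordToHex_spec : Claim_equal_wordToHex := by
  intro l _
  unfold Spec_wordToHex wordToHex wordToHex_alt
  have hr : PySem.List.pyRange 0 4 1 = [0, 1, 2, 3] := by decide
  rw [hr]
  simp only [List.foldl, List.flatMap, List.map]
  rw [band_mask32]
  simp only [show ((0:Int)*8).toNat = (0:Nat) from rfl, show ((1:Int)*8).toNat = (8:Nat) from rfl,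
    show ((2:Int)*8).toNat = (16:Nat) from rfl, show ((3:Int)*8).toNat = (24:Nat) from rfl,
    Int.shiftRight_natCast_right, Int.shiftRight_eq_div_pow]
  norm_num
  rw [band_255 l, band_255 (l / 256), band_255 (l / 65536), band_255 (l / 16777216)]
  rw [hex2 (l % 256) (by omega) (by omega),
    hex2 (l / 256 % 256) (by omega) (by omega),
    hex2 (l / 65536 % 256) (by omega) (by omega),
    hex2 (l / 16777216 % 256) (by omega) (by omega)]
  rw [show l / 256 % 256 = l % 4294967296 / 256 % 256 by omega,
    show l / 65536 % 256 = l % 4294967296 / 65536 % 256 by omega,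
    show l / 16777216 % 256 = l % 4294967296 / 16777216 % 256 by omega]
  simp only [String.append_assoc]
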